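-- pv_equiv track=rewrite | github.com/Juniorleriche27/INNOVAPLUS | apps/koryxa/backend/app/routers/data_analyst_module1.py | _zip_pick_members
-- ===== SOURCE A (Python) =====
-- from typing import Dict, List, Optional
--
-- def _zip_pick_members(names: List[str], required: List[str]) -> Dict[str, str]:
--     lower_names = {n.lower(): n for n in names}
--     mapping: Dict[str, str] = {}
--     for req in required:
--         req_lower = req.lower()
--         if req_lower in lower_names:
--             mapping[req] = lower_names[req_lower]
--             continue
--         # allow files nested in a folder inside the zip
--         found = next((n for n in names if n.lower().endswith("/" + req_lower)), None)
--         if found: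
--             mapping[req] = found
--     return mapping
-- ===== SOURCE B (Python) =====
-- def _zip_pick_members(names, required):
--     # Build lookup tables once: exact lowercase name -> name (last wins, as dict
--     # comprehension overwrites), and every after-a-slash lowercase suffix -> first name.
--     exact = {n.lower(): n for n in names}
--     suffix = {}
--     for n in names:
--         low = n.lower()
--         for i, ch in enumerate(low):
--             if ch == "/":
--                 suffix.setdefault(low[i + 1:], n)
--     mapping = {}
--     for req in required:
--         rl = req.lower()
--         if rl in exact:
--             mapping[req] = exact[rl]
--         elif rl in suffix:
--             mapping[req] = suffix[rl]
--     return mapping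
-- ===== Notes on version B (the rewrite author's own statement) =====
-- stated objective: faster
-- what changed: B precomputes two dictionaries over the names once (exact lowercase name -> name, and every after-a-slash lowercase suffix -> first matching name), so each required entry is resolved by O(1) lookups instead of A's linear endswith scan over all names.
import Mathlib
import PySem

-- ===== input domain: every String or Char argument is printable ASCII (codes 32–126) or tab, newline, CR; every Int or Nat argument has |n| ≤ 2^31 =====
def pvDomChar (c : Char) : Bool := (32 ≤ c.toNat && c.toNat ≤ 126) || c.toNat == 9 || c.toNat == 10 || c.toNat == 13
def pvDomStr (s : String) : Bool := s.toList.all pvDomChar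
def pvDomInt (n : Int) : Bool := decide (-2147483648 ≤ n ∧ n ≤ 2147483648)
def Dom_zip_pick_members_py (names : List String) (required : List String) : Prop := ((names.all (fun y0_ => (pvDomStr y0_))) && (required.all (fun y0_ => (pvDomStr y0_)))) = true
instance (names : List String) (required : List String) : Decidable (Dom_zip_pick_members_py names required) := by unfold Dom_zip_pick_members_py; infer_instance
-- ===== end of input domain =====

-- B replaces A's per-request linear scan over all names by two dictionaries built once
-- (exact lowercase name -> last name, every after-a-slash lowercase suffix -> first name).

-- ===== PORT A =====
def zip_pick_members_py (names : List String) (required : List String) : List (String × String) :=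
  -- lower_names = {n.lower(): n for n in names}
  let lower_names : PySem.Dict String String :=
    names.foldl (fun d n => d.insert (PySem.Str.lower n) n) PySem.Dict.empty
  -- for req in required: ...
  let mapping : PySem.Dict String String :=
    required.foldl (fun m req =>
      let rl := PySem.Str.lower req
      if lower_names.contains rl then
        m.insert req (lower_names.getD rl "")
      else
        -- found = next((n for n in names if n.lower().endswith("/" + req_lower)), None)
        match names.find? (fun n => PySem.Str.endswith (PySem.Str.lower n) (String.ofList ('/' :: rl.toList))) with
        | some found => if found ≠ "" then m.insert req found else m  -- `if found:` truthiness on str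
        | none => m) PySem.Dict.empty
  mapping.items

-- ===== PORT B =====
-- the lowercase tails after each '/' of low: [low[i+1:] for i,ch in enumerate(low) if ch == '/']
def pvSlashSuffixes (cs : List Char) : List (List Char) :=
  match cs with
  | [] => []
  | c :: rest => if c = '/' then rest :: pvSlashSuffixes rest else pvSlashSuffixes rest

def zip_pick_members_py_alt (names : List String) (required : List String) : List (String × String) :=
  let exact : PySem.Dict String String :=
    names.foldl (fun d n => d.insert (PySem.Str.lower n) n) PySem.Dict.empty
  let suffix : PySem.Dict (List Char) String :=
    names.foldl (fun d n =>
      (pvSlashSuffixes (PySem.Str.lower n).toList).foldl (fun d s => d.setdefault s n) d)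
      PySem.Dict.empty
  let mapping : PySem.Dict String String :=
    required.foldl (fun m req =>
      let rl := PySem.Str.lower req
      if exact.contains rl then m.insert req (exact.getD rl "")
      else if suffix.contains rl.toList then m.insert req (suffix.getD rl.toList "")
      else m) PySem.Dict.empty
  mapping.items

-- ===== PRECONDITION & SPEC =====
def Spec_zip_pick_members_py (names : List String) (required : List String) (out : List (String × String)) : Prop := out = zip_pick_members_py_alt names required
instance (names : List String) (required : List String) (out : List (String × String)) : Decidable (Spec_zip_pick_members_py names required out) := by unfold Spec_zip_pick_members_py; infer_instance

-- ===== CLAIM (what is proved, stated in full; the proofs are below) =====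
def Claim_equal_zip_pick_members_py : Prop := ∀ (names : List String) (required : List String), Dom_zip_pick_members_py names required → Spec_zip_pick_members_py names required (zip_pick_members_py names required)

-- ===== LEMMAS AND PROOFS =====

-- membership in pvSlashSuffixes IS the "ends with '/' + s" test
theorem mem_pvSlashSuffixes_iff (low s : List Char) :
    s ∈ pvSlashSuffixes low ↔ ('/' :: s) <:+ low := by
  induction low with
  | nil => simp [pvSlashSuffixes]
  | cons c rest ih =>
    simp only [pvSlashSuffixes]
    by_cases hc : c = '/'
    · subst hc
      simp [List.suffix_cons_iff, ih]
    · rw [if_neg hc]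
      simp [List.suffix_cons_iff, ih, Ne.symm hc]

-- the inner setdefault loop: lookup after seeding all suffixes of one name
theorem get?_setdefault_fold (sufs : List (List Char)) (n : String)
    (d : PySem.Dict (List Char) String) (s : List Char) :
    (sufs.foldl (fun d s' => d.setdefault s' n) d).get? s =
      if (d.get? s).isSome then d.get? s else if s ∈ sufs then some n else none := by
  induction sufs generalizing d with
  | nil => simp
  | cons s₁ rest ih =>
    simp only [List.foldl_cons, ih, List.mem_cons]
    by_cases hs : s = s₁
    · subst hs
      rw [PySem.Dict.get?_setdefault_self]
      cases h : d.get? s with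
      | none => simp
      | some v => simp
    · rw [PySem.Dict.get?_setdefault_of_ne _ _ hs]
      simp [hs]

-- the suffix dictionary resolves s to the FIRST name owning s as a slash-suffix
theorem get?_suffixDict (names : List String) (d : PySem.Dict (List Char) String) (s : List Char) :
    (names.foldl (fun d n =>
        (pvSlashSuffixes (PySem.Str.lower n).toList).foldl (fun d s' => d.setdefault s' n) d) d).get? s =
      if (d.get? s).isSome then d.get? s
      else names.find? (fun n => (pvSlashSuffixes (PySem.Str.lower n).toList).contains s) := by
  induction names generalizing d with
  | nil => cases hq : d.get? s <;> simp [hq]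
  | cons n rest ih =>
    simp only [PySem.Str.toList_lower] at ih ⊢
    rw [List.foldl_cons, ih, get?_setdefault_fold, List.find?_cons]
    by_cases hd : (d.get? s).isSome
    · simp [hd]
    · by_cases hm : s ∈ pvSlashSuffixes (PySem.Chars.lower n.toList)
      · simp [hd, hm]
      · simp [hd, hm]

theorem get?_suffixDict_empty (names : List String) (s : List Char) :
    (names.foldl (fun d n =>
        (pvSlashSuffixes (PySem.Str.lower n).toList).foldl (fun d s' => d.setdefault s' n) d)
        PySem.Dict.empty).get? s =
      names.find? (fun n => (pvSlashSuffixes (PySem.Str.lower n).toList).contains s) := by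
  rw [get?_suffixDict]
  simp

-- A's endswith test equals B's suffix-membership test, name by name
theorem endswith_eq_contains (n : String) (rl : String) :
    PySem.Str.endswith (PySem.Str.lower n) (String.ofList ('/' :: rl.toList)) =
      (pvSlashSuffixes (PySem.Str.lower n).toList).contains rl.toList := by
  have h1 : (String.ofList ('/' :: rl.toList)).toList = '/' :: rl.toList := String.toList_ofList
  rw [Bool.eq_iff_iff]
  simp only [PySem.Str.endswith_eq, h1, PySem.Chars.endswith_iff, List.contains_eq_mem,
    decide_eq_true_eq]
  exact (mem_pvSlashSuffixes_iff _ _).symm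

-- any name passing A's endswith test is nonempty
theorem found_ne_empty {n rl : String}
    (h : PySem.Str.endswith (PySem.Str.lower n) (String.ofList ('/' :: rl.toList)) = true) :
    n ≠ "" := by
  intro he
  subst he
  rw [PySem.Str.endswith_eq, PySem.Chars.endswith_iff, String.toList_ofList] at h
  simp [PySem.Str.toList_lower, PySem.Chars.lower] at h

-- ===== VERDICT (by name: the statement is the Claim_ definition above) =====
theorem zip_pick_members_py_spec : Claim_equal_zip_pick_members_py := by
  intro names required _
  unfold Spec_zip_pick_members_py zip_pick_members_py zip_pick_members_py_alt
  dsimp only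
  congr 1
  apply PySem.List.foldl_congr_mem
  intro m req _
  by_cases hc : (names.foldl (fun d n => d.insert (PySem.Str.lower n) n) PySem.Dict.empty).contains (PySem.Str.lower req)
  · simp [hc]
  · simp only [hc, if_false, Bool.false_eq_true]
    have hpred : (fun n => PySem.Str.endswith (PySem.Str.lower n) (String.ofList ('/' :: (PySem.Str.lower req).toList))) =
        (fun n => (pvSlashSuffixes (PySem.Str.lower n).toList).contains (PySem.Str.lower req).toList) := by
      funext n; exact endswith_eq_contains n (PySem.Str.lower req)
    rw [hpred, PySem.Dict.contains_eq_isSome_get?, get?_suffixDict_empty, PySem.Dict.getD,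
      get?_suffixDict_empty]
    cases hf : names.find? (fun n => (pvSlashSuffixes (PySem.Str.lower n).toList).contains (PySem.Str.lower req).toList) with
    | none => simp
    | some found =>
      have hne : found ≠ "" := by
        have hp := List.find?_some hf
        apply found_ne_empty (rl := PySem.Str.lower req)
        rw [endswith_eq_contains]
        exact hp
      simp [hne]
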